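-- pv_equiv track=rewrite | github.com/maximbarbe/UVa | Volume 004/408 - Uniform Generator.py | generates
-- ===== SOURCE A (Python) =====
-- def generates(step, mod):
--     seen = set()
--     x = 0
--     while True:
--         if len(seen) == mod:
--             return True
--         x = (x + step)%mod
--         if x in seen:
--             return False
--         seen.add(x)
-- ===== SOURCE B (Python) =====
-- def generates(step, mod):
--     # Uniform iff the additive order of step modulo mod is mod itself,
--     # i.e. gcd(step, mod) == 1 (only meaningful for a positive modulus).
--     if mod <= 0:
--         return False
--     a = abs(step)
--     b = mod
--     while b:
--         a, b = b, a % b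
--     return a == 1
-- ===== Notes on version B (the rewrite author's own statement) =====
-- stated objective: faster
-- what changed: Replaces the O(mod) simulation of the LCG walk with a seen-set by Euclid's gcd test: the walk visits every residue iff gcd(step, mod) == 1.
-- intended difference: For mod == 0 A returns True immediately (len(empty seen) == 0 fires before any step is taken), while B returns False; B's value is intended because no generator over a modulus of 0 produces anything, the True is an accident of A's loop-entry check. — e.g. on generates(3, 0): A returns true, B returns false
import Mathlib
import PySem

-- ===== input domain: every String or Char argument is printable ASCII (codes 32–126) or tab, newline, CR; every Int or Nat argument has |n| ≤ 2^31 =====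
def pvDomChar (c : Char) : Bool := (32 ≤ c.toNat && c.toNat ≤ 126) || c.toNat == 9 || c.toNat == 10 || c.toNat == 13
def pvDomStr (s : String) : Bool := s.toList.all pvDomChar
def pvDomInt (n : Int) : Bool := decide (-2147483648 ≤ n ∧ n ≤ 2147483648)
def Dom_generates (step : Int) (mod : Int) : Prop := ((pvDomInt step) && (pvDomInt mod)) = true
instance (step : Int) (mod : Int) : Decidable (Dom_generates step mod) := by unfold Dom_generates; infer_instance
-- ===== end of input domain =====

-- B replaces A's O(mod) seen-set walk of the LCG by Euclid's gcd test (full period ↔ gcd(step, mod) = 1);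
-- on mod = 0 the two intentionally differ (see D_generates below).

-- ===== PORT A =====
-- A's 'while True' loop; it always returns within |mod| + 2 iterations (the seen set grows by one
-- distinct residue per iteration), so the fuel mod.natAbs + 2 is never exhausted (proved in loopA_eq below).
def generatesLoop (step m : Int) (fuel : Nat) (seen : Std.HashSet Int) (x : Int) : Bool :=
  match fuel with
  | 0 => false
  | fuel' + 1 =>
    if (seen.size : Int) = m then true
    else
      let x' := PySem.Int.mod (x + step) m
      if seen.contains x' then false
      else generatesLoop step m fuel' (seen.insert x') x'

def generates (step : Int) (mod : Int) : Bool :=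
  generatesLoop step mod (mod.natAbs + 2) (∅ : Std.HashSet Int) 0

-- ===== PORT B =====
-- hand-written Euclid loop of Source B: 'while b: a, b = b, a % b' (b is always the positive previous remainder)
def euclid (a b : Nat) : Nat :=
  if h : b = 0 then a else euclid b (a % b)
decreasing_by exact Nat.mod_lt _ (Nat.pos_of_ne_zero h)

def generates_alt (step : Int) (mod : Int) : Bool :=
  if mod ≤ 0 then false
  else euclid step.natAbs mod.toNat == 1

-- ===== PRECONDITION & SPEC =====
-- For mod == 0 A returns True immediately (len(empty seen) == 0 fires before any step is taken), while B
-- returns False; B's value is intended: no generator over a modulus of 0 produces anything, A's True is an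
-- accident of its loop-entry check.
def D_generates (step : Int) (mod : Int) : Prop := mod = 0
instance (step : Int) (mod : Int) : Decidable (D_generates step mod) := by unfold D_generates; infer_instance
def Spec_generates (step : Int) (mod : Int) (out : Bool) : Prop := ¬ D_generates step mod → out = generates_alt step mod
instance (step : Int) (mod : Int) (out : Bool) : Decidable (Spec_generates step mod out) := by unfold Spec_generates; infer_instance
def pvDiffWitness_generates : Int × Int := (3, 0)
def pvDiffWitnessOut_generates : Bool × Bool := (true, false)

-- ===== CLAIM (what is proved, stated in full; the proofs are below) =====
def Claim_unchanged_generates : Prop := ∀ (step : Int) (mod : Int), Dom_generates step mod → Spec_generates step mod (generates step mod)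
def Claim_changed_generates : Prop := Dom_generates (pvDiffWitness_generates.1) (pvDiffWitness_generates.2) ∧ D_generates (pvDiffWitness_generates.1) (pvDiffWitness_generates.2) ∧ generates (pvDiffWitness_generates.1) (pvDiffWitness_generates.2) = pvDiffWitnessOut_generates.1 ∧ generates_alt (pvDiffWitness_generates.1) (pvDiffWitness_generates.2) = pvDiffWitnessOut_generates.2 ∧ pvDiffWitnessOut_generates.1 ≠ pvDiffWitnessOut_generates.2
def Claim_exact_generates : Prop := ∀ (step : Int) (mod : Int), Dom_generates step mod → D_generates step mod → generates step mod ≠ generates_alt step mod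

-- ===== LEMMAS AND PROOFS =====

-- residue after k steps of A's walk: x_k = (k*step) % m  (Python %)
def resid (step m : Int) (k : Nat) : Int := PySem.Int.mod ((k : Int) * step) m

lemma pymod_dvd_sub (a m : Int) : m ∣ a - PySem.Int.mod a m :=
  ⟨PySem.Int.floordiv a m, by
    have h := PySem.Int.floordiv_mul_add_mod a m
    linarith [mul_comm m (PySem.Int.floordiv a m)]⟩

lemma pymod_eq_iff (a b m : Int) (hm : m ≠ 0) :
    PySem.Int.mod a m = PySem.Int.mod b m ↔ m ∣ a - b := by
  constructor
  · intro h
    have h3 : m ∣ (a - PySem.Int.mod a m) - (b - PySem.Int.mod b m) :=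
      dvd_sub (pymod_dvd_sub a m) (pymod_dvd_sub b m)
    rw [h] at h3
    have h4 : (a - PySem.Int.mod b m) - (b - PySem.Int.mod b m) = a - b := by ring
    rwa [h4] at h3
  · intro h
    have h3 : m ∣ PySem.Int.mod a m - PySem.Int.mod b m := by
      have h4 := dvd_add (dvd_sub (pymod_dvd_sub b m) (pymod_dvd_sub a m)) h
      have h5 : (b - PySem.Int.mod b m) - (a - PySem.Int.mod a m) + (a - b)
          = PySem.Int.mod a m - PySem.Int.mod b m := by ring
      rwa [h5] at h4
    have hb : (PySem.Int.mod a m - PySem.Int.mod b m).natAbs < m.natAbs := by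
      rcases lt_or_gt_of_ne hm with hneg | hpos
      · have ba := PySem.Int.mod_neg_bounds a hneg
        have bb := PySem.Int.mod_neg_bounds b hneg
        omega
      · have ba1 := PySem.Int.mod_nonneg a hpos
        have ba2 := PySem.Int.mod_lt a hpos
        have bb1 := PySem.Int.mod_nonneg b hpos
        have bb2 := PySem.Int.mod_lt b hpos
        omega
    rcases h3 with ⟨c, hc⟩
    rcases eq_or_ne c 0 with rfl | hc0
    · omega
    · exfalso
      have hle : m.natAbs * 1 ≤ m.natAbs * c.natAbs :=
        Nat.mul_le_mul_left _ (Nat.one_le_iff_ne_zero.mpr (Int.natAbs_ne_zero.mpr hc0))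
      rw [hc, Int.natAbs_mul] at hb
      omega

lemma sq_zero (step m : Int) : resid step m 0 = 0 := by
  have : ((0 : Nat) : Int) * step = 0 := by ring
  rw [resid, this]
  exact (PySem.Int.mod_eq_zero_iff_dvd 0 m).mpr (dvd_zero m)

lemma sq_next (step m : Int) (hm : m ≠ 0) (k : Nat) :
    PySem.Int.mod (resid step m k + step) m = resid step m (k + 1) := by
  apply (pymod_eq_iff _ _ _ hm).mpr
  have h2 : (resid step m k + step) - (((k + 1 : Nat) : Int)) * step
      = -(((k : Int)) * step - resid step m k) := by push_cast; ring
  rw [h2]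
  exact dvd_neg.mpr (pymod_dvd_sub _ m)

-- m ∣ k*step  ↔  the additive order p = |m| / gcd(step, m) divides k
lemma order_dvd_iff (step m : Int) (hm : m ≠ 0) (k : Nat) :
    m ∣ (k : Int) * step ↔ (m.natAbs / Int.gcd step m) ∣ k := by
  have ha : 0 < m.natAbs := by omega
  have h1 : (m ∣ (k : Int) * step) ↔ m.natAbs ∣ k * step.natAbs := by
    rw [← Int.natAbs_dvd, Int.natCast_dvd, Int.natAbs_mul, Int.natAbs_natCast]
  rw [h1]
  -- pure Nat statement
  have hg : 0 < Nat.gcd step.natAbs m.natAbs := Nat.gcd_pos_of_pos_right _ ha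
  have hgcd : Int.gcd step m = Nat.gcd step.natAbs m.natAbs := rfl
  rw [hgcd]
  set g := Nat.gcd step.natAbs m.natAbs with hgdef
  obtain ⟨p, hp⟩ : g ∣ m.natAbs := Nat.gcd_dvd_right _ _
  obtain ⟨s', hs⟩ : g ∣ step.natAbs := Nat.gcd_dvd_left _ _
  have hpdiv : m.natAbs / g = p := by rw [hp]; exact Nat.mul_div_cancel_left p hg
  have hsdiv : step.natAbs / g = s' := by rw [hs]; exact Nat.mul_div_cancel_left s' hg
  have hcop : Nat.Coprime p s' := by
    have := Nat.coprime_div_gcd_div_gcd (m := step.natAbs) (n := m.natAbs) hg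
    rw [← hgdef, hpdiv, hsdiv] at this
    exact this.symm
  rw [hpdiv]
  constructor
  · intro h
    have h2 : g * p ∣ g * (k * s') := by
      rw [← hp]
      have : g * (k * s') = k * (g * s') := by ring
      rw [this, ← hs]
      exact h
    exact hcop.dvd_of_dvd_mul_right ((Nat.mul_dvd_mul_iff_left hg).mp h2)
  · rintro ⟨t, rfl⟩
    rw [hp, hs]
    exact ⟨t * s', by ring⟩

lemma order_pos (step m : Int) (hm : m ≠ 0) : 0 < m.natAbs / Int.gcd step m := by
  have ha : 0 < m.natAbs := by omega
  have hg : 0 < Int.gcd step m := Nat.gcd_pos_of_pos_right _ ha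
  exact Nat.div_pos (Nat.le_of_dvd ha (Nat.gcd_dvd_right _ _)) hg

lemma sq_inj (step m : Int) (hm : m ≠ 0) {i j : Nat}
    (hi : 1 ≤ i) (hij : i < j) (hj : j ≤ m.natAbs / Int.gcd step m) :
    resid step m i ≠ resid step m j := by
  intro h
  have hd : m ∣ (j : Int) * step - (i : Int) * step := by
    have := (pymod_eq_iff ((j : Int) * step) ((i : Int) * step) m hm).mp h.symm
    exact this
  have hd2 : m ∣ ((j - i : Nat) : Int) * step := by
    have hcast : ((j - i : Nat) : Int) * step = (j : Int) * step - (i : Int) * step := by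
      push_cast [Nat.cast_sub (le_of_lt hij)]
      ring
    rw [hcast]
    exact hd
  have := (order_dvd_iff step m hm (j - i)).mp hd2
  have hle := Nat.le_of_dvd (by omega) this
  omega

lemma sq_wrap (step m : Int) (hm : m ≠ 0) :
    resid step m (m.natAbs / Int.gcd step m + 1) = resid step m 1 := by
  apply (pymod_eq_iff _ _ _ hm).mpr
  have h : ((m.natAbs / Int.gcd step m + 1 : Nat) : Int) * step - ((1 : Nat) : Int) * step
      = ((m.natAbs / Int.gcd step m : Nat) : Int) * step := by push_cast; ring
  rw [h]
  exact (order_dvd_iff step m hm _).mpr dvd_rfl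

-- the loop, started after k distinct steps, computes the gcd test
lemma loopA_eq (step m : Int) (hm : m ≠ 0) :
    ∀ (fuel k : Nat) (seen : Std.HashSet Int), k ≤ m.natAbs / Int.gcd step m →
      m.natAbs / Int.gcd step m + 2 ≤ fuel + k →
      seen.size = k →
      (∀ y, y ∈ seen ↔ ∃ i, i < k ∧ y = resid step m (i + 1)) →
      generatesLoop step m fuel seen (resid step m k)
        = (decide (0 < m) && decide (Int.gcd step m = 1)) := by
  intro fuel
  induction fuel with
  | zero => intro k seen hk hf hsz hmem; omega
  | succ fuel ih =>
    intro k seen hk hf hsz hmem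
    set p := m.natAbs / Int.gcd step m with hpdef
    have hppos := order_pos step m hm
    have hple : p ≤ m.natAbs := Nat.div_le_self m.natAbs (Int.gcd step m)
    rw [generatesLoop, hsz]
    by_cases hkm : (k : Int) = m
    · rw [if_pos hkm]
      have hmpos : 0 < m := by omega
      have hak : m.natAbs = k := by omega
      have hpa : p = m.natAbs := by omega
      have hg1 : Int.gcd step m = 1 := by
        have := Nat.div_eq_self.mp hpa
        omega
      simp [hmpos, hg1]
    · rw [if_neg hkm]
      have hnext : PySem.Int.mod (resid step m k + step) m = resid step m (k + 1) := sq_next step m hm k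
      simp only [hnext]
      rcases Nat.lt_or_ge k p with hkp | hkp
      · -- k < p : the new residue is fresh, loop continues
        have hnotmem : resid step m (k + 1) ∉ seen := by
          intro hin
          obtain ⟨i, hi, heq⟩ := (hmem _).mp hin
          exact sq_inj step m hm (Nat.le_add_left 1 i) (by omega) (by omega) heq.symm
        rw [if_neg (fun hc => hnotmem (Std.HashSet.contains_iff_mem.mp hc))]
        apply ih (k + 1) (seen.insert (resid step m (k + 1))) (by omega) (by omega)
        · rw [Std.HashSet.size_insert, if_neg hnotmem, hsz]
        · intro y
          rw [Std.HashSet.mem_insert]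
          constructor
          · rintro (hy | hy)
            · exact ⟨k, by omega, (beq_iff_eq.mp hy).symm⟩
            · obtain ⟨i, hi, hyi⟩ := (hmem y).mp hy
              exact ⟨i, by omega, hyi⟩
          · rintro ⟨i, hi, rfl⟩
            rcases Nat.lt_or_ge i k with hik | hik
            · exact Or.inr ((hmem _).mpr ⟨i, hik, rfl⟩)
            · have : i = k := by omega
              subst this
              exact Or.inl (beq_iff_eq.mpr rfl)
      · -- k = p : the walk repeats (x_{p+1} = x_1), loop returns False
        have hkp' : k = p := by omega
        have hmem1 : resid step m (k + 1) ∈ seen := by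
          rw [hkp', sq_wrap step m hm]
          exact (hmem _).mpr ⟨0, by omega, rfl⟩
        rw [if_pos (Std.HashSet.contains_iff_mem.mpr hmem1)]
        -- RHS is false: otherwise p = |m| = m and the length check would have fired
        by_cases hmpos : 0 < m
        · by_cases hg1 : Int.gcd step m = 1
          · exfalso
            have : p = m.natAbs := by rw [hpdef, hg1, Nat.div_one]
            apply hkm
            omega
          · simp [hg1]
        · simp [hmpos]

lemma genA_char (step m : Int) (hm : m ≠ 0) :
    generates step m = (decide (0 < m) && decide (Int.gcd step m = 1)) := by
  have h := loopA_eq step m hm (m.natAbs + 2) 0 (∅ : Std.HashSet Int) (Nat.zero_le _)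
    (by have := Nat.div_le_self m.natAbs (Int.gcd step m); omega)
    Std.HashSet.size_empty
    (by intro y; simp [Std.HashSet.not_mem_empty])
  simpa [generates, sq_zero] using h

lemma euclid_eq_gcd : ∀ (b a : Nat), euclid a b = Nat.gcd b a := by
  intro b
  induction b using Nat.strong_induction_on with
  | _ b ih =>
    intro a
    rw [euclid]
    by_cases h : b = 0
    · simp [h]
    · rw [dif_neg h]
      rw [ih (a % b) (Nat.mod_lt _ (Nat.pos_of_ne_zero h)) b]
      exact (Nat.gcd_rec b a).symm

lemma genAlt_char (step m : Int) :
    generates_alt step m = (decide (0 < m) && decide (Int.gcd step m = 1)) := by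
  unfold generates_alt
  by_cases h : m ≤ 0
  · rw [if_pos h]
    have : ¬ (0 < m) := by omega
    simp [this]
  · rw [if_neg h]
    have hmpos : 0 < m := by omega
    have ht : m.toNat = m.natAbs := by omega
    rw [euclid_eq_gcd, ht]
    have hgcd : Nat.gcd m.natAbs step.natAbs = Int.gcd step m := Nat.gcd_comm _ _
    rw [hgcd]
    by_cases hq : Int.gcd step m = 1
    · simp [hq, hmpos]
    · simp [hq, hmpos]

-- ===== VERDICT (by name: the statement is the Claim_ definition above) =====
theorem generates_spec : Claim_unchanged_generates := by
  intro step mod hdom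
  unfold Spec_generates
  intro hD
  have hm : mod ≠ 0 := hD
  rw [genA_char step mod hm, genAlt_char step mod]

theorem generates_changed : Claim_changed_generates := by
  unfold Claim_changed_generates; decide

theorem generates_tight : Claim_exact_generates := by
  intro step mod hdom hD
  have h0 : mod = 0 := hD
  subst h0
  have hA : generates step 0 = true := by
    rw [generates, generatesLoop]
    simp
  have hB : generates_alt step 0 = false := by
    rw [generates_alt, if_pos le_rfl]
  rw [hA, hB]
  simp
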